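-- pv_equiv track=rewrite | github.com/Nolram567/HesseParlPy | corpus_manager.py | clean_corpus
-- ===== SOURCE A (Python) =====
-- import string
--
-- def clean_corpus(l: list[str]) -> list[str]:
--     """
--     Befreit eine Liste mit Strings von Interpunktionszeichen und nicht alphabetischen Zeichenfolgen.
--
--     Args:
--         l: Die zu bereinigende Liste.
--     Returns:
--         Die von Interpunktionszeichen befreite Liste.
--     """
--     lc = []
--     for entry in l:
--         lc = lc + entry.split(" ")
--     lc = [entry for entry in l if not all(char in string.punctuation for char in entry)]
--     translator = str.maketrans('', '', string.punctuation)
--     for i, entry in enumerate(lc):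
--         if any(char in string.punctuation for char in entry):
--             lc[i] = entry.translate(translator)
--     return lc
-- ===== SOURCE B (Python) =====
-- import string
--
-- def clean_corpus(l: list[str]) -> list[str]:
--     # Strip punctuation from every token first, then drop tokens that became empty.
--     translator = str.maketrans('', '', string.punctuation)
--     result = []
--     for entry in l:
--         stripped = entry.translate(translator)
--         if stripped:
--             result.append(stripped)
--     return result
-- ===== Notes on version B (the rewrite author's own statement) =====
-- stated objective: simpler
-- what changed: Drops A's dead quadratic split-and-concatenate loop and replaces the two-phase 'filter all-punctuation tokens, then strip survivors that contain punctuation' with one pass that strips every token and keeps it only if non-empty.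
import Mathlib
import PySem

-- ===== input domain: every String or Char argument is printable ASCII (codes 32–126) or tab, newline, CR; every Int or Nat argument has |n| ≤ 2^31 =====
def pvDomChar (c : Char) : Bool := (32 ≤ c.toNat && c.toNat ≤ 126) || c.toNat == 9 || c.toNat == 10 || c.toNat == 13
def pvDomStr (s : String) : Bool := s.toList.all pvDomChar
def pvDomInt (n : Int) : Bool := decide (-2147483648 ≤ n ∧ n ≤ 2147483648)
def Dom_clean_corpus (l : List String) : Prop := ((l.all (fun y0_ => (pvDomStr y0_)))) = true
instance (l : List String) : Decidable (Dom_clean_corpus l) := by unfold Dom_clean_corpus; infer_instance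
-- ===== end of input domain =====

-- B drops A's dead split loop and does one strip-then-keep-if-nonempty pass instead of A's filter-then-strip two phases; return values proved equal.

-- string.punctuation
def pvPunct : List Char := "!\"#$%&'()*+,-./:;<=>?@[\\]^_`{|}~".toList

-- entry.translate(str.maketrans('', '', string.punctuation)): remove punctuation chars (exact on any input)
def pvTranslate (e : String) : String := String.ofList (e.toList.filter (fun c => !pvPunct.contains c))

-- ===== PORT A =====
def clean_corpus (l : List String) : List String :=
  -- dead first loop: lc = lc + entry.split(" ") (sep nonempty, so split? always returns some)
  let _lc0 := l.foldl (fun acc e => acc ++ (PySem.Str.split? e " ").getD []) []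
  -- lc = [entry for entry in l if not all(char in punctuation for char in entry)]
  let lc := l.filter (fun e => !(e.toList.all (fun c => pvPunct.contains c)))
  -- for i, entry in enumerate(lc): if any punctuation char: lc[i] = entry.translate(translator)
  lc.map (fun e =>
    if e.toList.any (fun c => pvPunct.contains c) then pvTranslate e else e)

-- ===== PORT B =====
def clean_corpus_alt (l : List String) : List String :=
  l.foldl (fun acc entry =>
    if pvTranslate entry != "" then acc ++ [pvTranslate entry] else acc) []

-- ===== PRECONDITION & SPEC =====
def Spec_clean_corpus (l : List String) (out : List String) : Prop := out = clean_corpus_alt l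
instance (l : List String) (out : List String) : Decidable (Spec_clean_corpus l out) := by unfold Spec_clean_corpus; infer_instance

-- ===== CLAIM (what is proved, stated in full; the proofs are below) =====
def Claim_equal_clean_corpus : Prop := ∀ (l : List String), Dom_clean_corpus l → Spec_clean_corpus l (clean_corpus l)

-- ===== LEMMAS AND PROOFS =====

theorem translate_eq_empty (e : String) :
    pvTranslate e = "" ↔ (e.toList.all (fun c => pvPunct.contains c)) = true := by
  unfold pvTranslate
  constructor
  · intro h
    have h' : e.toList.filter (fun c => !pvPunct.contains c) = [] := by
      have := congrArg String.toList h
      simpa using this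
    rw [List.all_eq_true]
    intro c hc
    have := List.filter_eq_nil_iff.mp h' c hc
    simpa using this
  · intro h
    have h' : e.toList.filter (fun c => !pvPunct.contains c) = [] := by
      rw [List.filter_eq_nil_iff]
      intro c hc
      simp only [Bool.not_eq_true', Bool.not_eq_false]
      exact List.all_eq_true.mp h c hc
    rw [h']

theorem translate_of_no_punct (e : String)
    (h : (e.toList.any (fun c => pvPunct.contains c)) = false) : pvTranslate e = e := by
  unfold pvTranslate
  have h' : e.toList.filter (fun c => !pvPunct.contains c) = e.toList := by
    apply List.filter_eq_self.mpr
    intro c hc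
    have hnc : ¬ (pvPunct.contains c = true) := by
      intro hcp
      have ha : (e.toList.any (fun c => pvPunct.contains c)) = true :=
        List.any_eq_true.mpr ⟨c, hc, hcp⟩
      rw [ha] at h; cases h
    simpa using hnc
  rw [h']
  exact String.ofList_toList

theorem a_char (l : List String) :
    clean_corpus l
      = (l.filter (fun e => !(e.toList.all (fun c => pvPunct.contains c)))).map
          (fun e => if e.toList.any (fun c => pvPunct.contains c) then pvTranslate e else e) := rfl

theorem b_char (l : List String) :
    clean_corpus_alt l
      = (l.filter (fun entry => pvTranslate entry != "")).map pvTranslate := by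
  unfold clean_corpus_alt
  rw [PySem.List.foldl_append_if]
  rfl

theorem clean_eq (l : List String) : clean_corpus l = clean_corpus_alt l := by
  rw [a_char, b_char]
  induction l with
  | nil => rfl
  | cons e t ih =>
    rw [List.filter_cons, List.filter_cons]
    by_cases hall : (e.toList.all (fun c => pvPunct.contains c)) = true
    · have hte : pvTranslate e = "" := (translate_eq_empty e).mpr hall
      rw [if_neg (by simpa using hall), if_neg (by simp [hte])]
      exact ih
    · have hte : pvTranslate e ≠ "" := fun h => hall ((translate_eq_empty e).mp h)
      rw [if_pos (by simpa using hall), if_pos (by simp [hte]), List.map_cons, List.map_cons]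
      by_cases hany : (e.toList.any (fun c => pvPunct.contains c)) = true
      · rw [if_pos hany, ih]
      · rw [if_neg hany, translate_of_no_punct e (by simpa using hany), ih]

-- ===== VERDICT (by name: the statement is the Claim_ definition above) =====
theorem clean_corpus_spec : Claim_equal_clean_corpus := by
  intro l _
  unfold Spec_clean_corpus
  exact clean_eq l
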